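-- pv_equiv track=rewrite | github.com/jaimesanz/ratadns-filters | core.py | keys_with_max_vals
-- ===== SOURCE A (Python) =====
-- import heapq
--
-- def keys_with_max_vals(d, n):
--     # The - is for python min-heap
--     inverse = [[-p[1], p[0]] for p in d.items()]
--     n = min(n, len(inverse))
--     heapq.heapify(inverse)
--
--     result = []
--     for i in range(n):  # First n s
--         elem = heapq.heappop(inverse)
--         result.append([elem[1], -elem[0]])
--
--     while len(inverse) > 0 and n > 0:  # The rest
--         elem = heapq.heappop(inverse)
--         if -elem[0] != result[n - 1][1]:
--             break
--         result.append([elem[1], -elem[0]])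
--     return result
-- ===== SOURCE B (Python) =====
-- def keys_with_max_vals(d, n):
--     items = sorted(d.items(), key=lambda kv: (-kv[1], kv[0]))
--     m = min(n, len(items))
--     if m <= 0:
--         return []
--     thresh = items[m - 1][1]
--     result = [[k, v] for k, v in items[:m]]
--     for k, v in items[m:]:
--         if v != thresh:
--             break
--         result.append([k, v])
--     return result
-- ===== Notes on version B (the rewrite author's own statement) =====
-- stated objective: simpler
-- what changed: Replaces the heapify + repeated heappop-with-tie-extension loop by a single sort of the items with key (-value, key), a clamped slice of the first m entries, and a forward walk extending over boundary ties.
import Mathlib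
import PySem

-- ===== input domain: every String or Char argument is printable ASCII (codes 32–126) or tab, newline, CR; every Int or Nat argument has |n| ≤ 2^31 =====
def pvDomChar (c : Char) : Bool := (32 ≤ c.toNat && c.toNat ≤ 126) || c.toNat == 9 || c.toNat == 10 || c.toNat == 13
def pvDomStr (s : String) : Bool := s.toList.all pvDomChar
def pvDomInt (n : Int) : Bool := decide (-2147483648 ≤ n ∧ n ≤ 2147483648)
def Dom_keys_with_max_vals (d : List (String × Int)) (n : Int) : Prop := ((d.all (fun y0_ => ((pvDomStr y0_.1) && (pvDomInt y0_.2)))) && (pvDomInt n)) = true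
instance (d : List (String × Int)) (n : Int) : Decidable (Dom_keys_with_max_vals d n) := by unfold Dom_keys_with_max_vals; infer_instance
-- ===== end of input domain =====

-- B replaces A's heapify + repeated-heappop loop with tie extension by a single sort of the
-- items by (-value, key), a clamped prefix slice, and a forward walk over boundary ties (simpler).


-- ===== PORT A =====
-- Python's list comparison of the 2-element heap entries [-value, key]: lexicographic
def pairLtB (a b : Int × String) : Bool :=
  decide (a.1 < b.1) || (a.1 == b.1 && decide (a.2 < b.2))

-- heapq.heappop: remove and return the minimum entry (the entries here are pairwise
-- distinct — dict keys are unique — so "the minimum" is unambiguous and this is exact;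
-- heapq.heapify is the identity on this abstraction of the heap as its element list)
def popMin : List (Int × String) → Option ((Int × String) × List (Int × String))
  | [] => none
  | x :: xs =>
    match popMin xs with
    | some (m, rest) => if pairLtB m x then some (m, x :: rest) else some (x, xs)
    | none => some (x, xs)

theorem popMin_length : ∀ {l : List (Int × String)} {e : Int × String}
    {rest : List (Int × String)}, popMin l = some (e, rest) → rest.length + 1 = l.length := by
  intro l
  induction l with
  | nil => intro e rest h; simp [popMin] at h
  | cons x xs ih =>
    intro e rest h
    simp only [popMin] at h
    cases hm : popMin xs with
    | none => rw [hm] at h; simp_all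
    | some p =>
      obtain ⟨m, r⟩ := p
      rw [hm] at h
      by_cases hb : pairLtB m x = true <;> simp [hb] at h
      · obtain ⟨he, hr⟩ := h
        have := ih hm
        subst hr
        simp at this ⊢; omega
      · obtain ⟨he, hr⟩ := h
        subst hr; rfl

-- the 'for i in range(n)' loop of heappops; state = (result, inverse)
def heapLoop1 : Nat → List (Int × String) → List (String × Int) →
    List (String × Int) × List (Int × String)
  | 0, inv, res => (res, inv)
  | k + 1, inv, res =>
    match popMin inv with
    | none => (res, inv)            -- unreachable: the range bound is ≤ len(inverse)
    | some (e, inv') => heapLoop1 k inv' (res ++ [(e.2, -e.1)])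

-- the trailing 'while len(inverse) > 0 and n > 0' loop
def heapLoop2 (n : Int) (inv : List (Int × String)) (res : List (String × Int)) :
    List (String × Int) :=
  if 0 < inv.length ∧ 0 < n then
    match h : popMin inv with
    | none => res                   -- unreachable: inv ≠ []
    | some (e, inv') =>
      match PySem.List.pyGet? res (n - 1) with
      | none => res                 -- unreachable: result[n-1] is in range in the loop
      | some r => if -e.1 ≠ r.2 then res else heapLoop2 n inv' (res ++ [(e.2, -e.1)])
  else res
termination_by inv.length
decreasing_by have := popMin_length h; omega

def keys_with_max_vals (d : List (String × Int)) (n : Int) : List (String × Int) :=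
  let inverse := ((PySem.Dict.ofList d).items).map (fun p => (-p.2, p.1))
  let n2 : Int := min n (inverse.length : Int)
  let st := heapLoop1 n2.toNat inverse []
  heapLoop2 n2 st.2 st.1

-- ===== PORT B =====
def keys_with_max_vals_alt (d : List (String × Int)) (n : Int) : List (String × Int) :=
  let items := PySem.List.sorted2 ((PySem.Dict.ofList d).items)
    (fun kv => -kv.2) (fun kv => kv.1)
  let m : Int := min n (items.length : Int)
  if m ≤ 0 then []
  else
    -- items[m-1][1]; the index is in range here (1 ≤ m ≤ len(items)), default never used
    let thresh := (PySem.List.pyGetD items (m - 1) ("", 0)).2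
    PySem.List.slice items none (some m)
      ++ (items.drop m.toNat).takeWhile (fun kv => kv.2 == thresh)

-- ===== PRECONDITION & SPEC =====
def Spec_keys_with_max_vals (d : List (String × Int)) (n : Int) (out : List (String × Int)) : Prop := out = keys_with_max_vals_alt d n
instance (d : List (String × Int)) (n : Int) (out : List (String × Int)) : Decidable (Spec_keys_with_max_vals d n out) := by unfold Spec_keys_with_max_vals; infer_instance

-- ===== CLAIM (what is proved, stated in full; the proofs are below) =====
def Claim_equal_keys_with_max_vals : Prop := ∀ (d : List (String × Int)) (n : Int), Dom_keys_with_max_vals d n → Spec_keys_with_max_vals d n (keys_with_max_vals d n)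

-- ===== LEMMAS AND PROOFS =====

theorem pairLtB_iff (a b : Int × String) : pairLtB a b = true ↔ toLex a < toLex b := by
  simp only [pairLtB, Bool.or_eq_true, Bool.and_eq_true, decide_eq_true_eq, beq_iff_eq,
    Prod.Lex.lt_iff, ofLex_toLex]

theorem popMin_cons_isSome (x : Int × String) (xs : List (Int × String)) :
    ∃ e rest, popMin (x :: xs) = some (e, rest) := by
  simp only [popMin]
  cases hm : popMin xs with
  | none => exact ⟨x, xs, rfl⟩
  | some p =>
    obtain ⟨m, r⟩ := p
    by_cases hb : pairLtB m x = true
    · exact ⟨m, x :: r, by simp [hb]⟩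
    · exact ⟨x, xs, by simp [hb]⟩

theorem popMin_some_spec : ∀ {l : List (Int × String)} {e : Int × String}
    {rest : List (Int × String)}, popMin l = some (e, rest) →
    (e :: rest).Perm l ∧ ∀ x ∈ rest, toLex e ≤ toLex x := by
  intro l
  induction l with
  | nil => intro e rest h; simp [popMin] at h
  | cons x xs ih =>
    intro e rest h
    simp only [popMin] at h
    cases hm : popMin xs with
    | none =>
      rw [hm] at h
      simp at h
      obtain ⟨he, hr⟩ := h
      subst he; subst hr
      cases xs with
      | nil => exact ⟨List.Perm.refl _, by simp⟩
      | cons y ys =>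
        obtain ⟨e', r', h'⟩ := popMin_cons_isSome y ys
        rw [h'] at hm; cases hm
    | some p =>
      obtain ⟨m, r⟩ := p
      rw [hm] at h
      obtain ⟨hperm, hmin⟩ := ih hm
      have h : (if pairLtB m x = true then some (m, x :: r) else some (x, xs))
          = some (e, rest) := h
      by_cases hb : pairLtB m x = true
      · rw [if_pos hb] at h
        simp only [Option.some.injEq, Prod.mk.injEq] at h
        obtain ⟨he, hr⟩ := h
        subst he; subst hr
        constructor
        · exact (List.Perm.swap x m r).trans (hperm.cons x)
        · intro y hy
          rcases List.mem_cons.mp hy with hy | hy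
          · exact le_of_lt (by rw [hy]; exact (pairLtB_iff m x).mp hb)
          · exact hmin y hy
      · rw [if_neg hb] at h
        simp only [Option.some.injEq, Prod.mk.injEq] at h
        obtain ⟨he, hr⟩ := h
        subst he; subst hr
        refine ⟨List.Perm.refl _, ?_⟩
        intro y hy
        have hxm : toLex x ≤ toLex m :=
          le_of_not_gt (fun hlt => hb ((pairLtB_iff m x).mpr hlt))
        rcases List.mem_cons.mp (hperm.mem_iff.mpr hy) with hym | hyr
        · rw [hym]; exact hxm
        · exact hxm.trans (hmin y hyr)

def popAll (l : List (Int × String)) : List (Int × String) :=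
  match h : popMin l with
  | none => []
  | some (e, rest) => e :: popAll rest
termination_by l.length
decreasing_by have := popMin_length h; omega

theorem popAll_nil : popAll [] = [] := by rw [popAll]; rfl

theorem popAll_some {l : List (Int × String)} {e : Int × String} {rest : List (Int × String)}
    (h : popMin l = some (e, rest)) : popAll l = e :: popAll rest := by
  rw [popAll, h]

theorem popAll_perm (l : List (Int × String)) : (popAll l).Perm l := by
  generalize hn : l.length = N
  induction N using Nat.strong_induction_on generalizing l with
  | _ N ih =>
    cases l with
    | nil => rw [popAll_nil]
    | cons x xs =>
      obtain ⟨e, rest, h⟩ := popMin_cons_isSome x xs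
      rw [popAll_some h]
      have hlen := popMin_length h
      have hperm := (popMin_some_spec h).1
      have hlt : rest.length < N := by rw [← hn]; omega
      have ihrest := ih rest.length hlt rest rfl
      exact (ihrest.cons e).trans hperm

theorem popAll_pairwise {l : List (Int × String)} (h : l.Nodup) :
    (popAll l).Pairwise (fun a b => toLex a < toLex b) := by
  generalize hn : l.length = N
  induction N using Nat.strong_induction_on generalizing l with
  | _ N ih =>
    cases l with
    | nil => rw [popAll_nil]; exact List.Pairwise.nil
    | cons x xs =>
      obtain ⟨e, rest, hp⟩ := popMin_cons_isSome x xs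
      rw [popAll_some hp]
      obtain ⟨hperm, hmin⟩ := popMin_some_spec hp
      have hnodup : (e :: rest).Nodup := (hperm.nodup_iff).mpr h
      have hrest : rest.Nodup := hnodup.of_cons
      have henotin : e ∉ rest := (List.nodup_cons.mp hnodup).1
      have hlen := popMin_length hp
      have hlt : rest.length < N := by rw [← hn]; omega
      refine List.Pairwise.cons ?_ (ih rest.length hlt hrest rfl)
      intro b hb
      have hbrest : b ∈ rest := (popAll_perm rest).mem_iff.mp hb
      have hle := hmin b hbrest
      have hne : toLex e ≠ toLex b := fun hEq => henotin (toLex.injective hEq ▸ hbrest)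
      exact lt_of_le_of_ne hle hne

theorem sorted2_eq_sorted_lex (xs : List (String × Int)) :
    PySem.List.sorted2 xs (fun kv => -kv.2) (fun kv => kv.1)
      = PySem.List.sorted xs (fun kv => toLex ((-kv.2 : Int), kv.1)) := by
  have hfun : (fun (a b : String × Int) =>
      (decide (-a.2 < -b.2) || (!decide (-b.2 < -a.2) && decide (a.1 < b.1))))
      = fun a b => decide (toLex ((-a.2 : Int), a.1) < toLex ((-b.2 : Int), b.1)) := by
    funext a b
    rw [Bool.eq_iff_iff]
    simp only [Bool.or_eq_true, Bool.and_eq_true, Bool.not_eq_eq_eq_not, Bool.not_true,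
      decide_eq_false_iff_not, decide_eq_true_eq, Prod.Lex.lt_iff, ofLex_toLex]
    constructor
    · rintro (h | ⟨h1, h2⟩)
      · exact Or.inl h
      · rcases lt_trichotomy (-a.2 : Int) (-b.2) with h' | h' | h'
        · exact Or.inl h'
        · exact Or.inr ⟨h', h2⟩
        · exact absurd h' h1
    · rintro (h | ⟨h1, h2⟩)
      · exact Or.inl h
      · exact Or.inr ⟨by omega, h2⟩
  have h1 : PySem.List.sorted2 xs (fun kv => -kv.2) (fun kv => kv.1)
      = List.foldl (fun acc x => PySem.List.insertBy (fun (a b : String × Int) =>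
          (decide (-a.2 < -b.2) || (!decide (-b.2 < -a.2) && decide (a.1 < b.1)))) x acc) [] xs := rfl
  have h2 : PySem.List.sorted xs (fun kv => toLex ((-kv.2 : Int), kv.1))
      = List.foldl (fun acc x => PySem.List.insertBy (fun (a b : String × Int) =>
          decide (toLex ((-a.2 : Int), a.1) < toLex ((-b.2 : Int), b.1))) x acc) [] xs := rfl
  rw [h1, h2, hfun]

theorem fInj : Function.Injective (fun p : String × Int => ((-p.2 : Int), p.1)) := by
  rintro ⟨k1, v1⟩ ⟨k2, v2⟩ h
  simp only [Prod.mk.injEq, neg_inj] at h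
  simp [h.1, h.2]

theorem items_sorted_eq (xs : List (String × Int)) (hx : xs.Nodup) :
    PySem.List.sorted xs (fun kv => toLex ((-kv.2 : Int), kv.1))
      = (popAll (xs.map (fun p => ((-p.2 : Int), p.1)))).map (fun e => (e.2, -e.1)) := by
  apply PySem.List.sorted_eq_of_perm_of_pairwise_lt
  · have hp := (popAll_perm (xs.map (fun p => ((-p.2 : Int), p.1)))).map (fun e : Int × String => (e.2, -e.1))
    refine hp.trans ?_
    rw [List.map_map]
    have : ((fun e : Int × String => (e.2, -e.1)) ∘ fun p : String × Int => ((-p.2 : Int), p.1))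
        = id := by funext p; simp
    rw [this, List.map_id]
  · rw [List.pairwise_map]
    have hpw := popAll_pairwise (hx.map fInj)
    refine hpw.imp ?_
    intro a b hab
    simpa using hab

theorem heapLoop1_spec : ∀ (k : Nat) (inv : List (Int × String)) (res : List (String × Int)),
    k ≤ inv.length →
    (heapLoop1 k inv res).1 = res ++ ((popAll inv).take k).map (fun e => (e.2, -e.1)) ∧
    popAll (heapLoop1 k inv res).2 = (popAll inv).drop k ∧
    (heapLoop1 k inv res).2.length + k = inv.length := by
  intro k
  induction k with
  | zero => intro inv res _; simp [heapLoop1]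
  | succ k ih =>
    intro inv res hk
    cases inv with
    | nil => simp at hk
    | cons x txs =>
      obtain ⟨e, inv', h⟩ := popMin_cons_isSome x txs
      have hlen := popMin_length h
      have hall := popAll_some h
      simp only [heapLoop1, h]
      have hk' : k ≤ inv'.length := by
        simp only [List.length_cons] at hk hlen; omega
      obtain ⟨h1, h2, h3⟩ := ih inv' (res ++ [(e.2, -e.1)]) hk'
      refine ⟨?_, ?_, ?_⟩
      · rw [h1, hall, List.take_succ_cons, List.map_cons, List.append_assoc]
        rfl
      · rw [h2, hall, List.drop_succ_cons]
      · simp only [List.length_cons] at hlen ⊢; omega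

theorem heapLoop2_spec (n : Int) (hn : 0 < n) :
    ∀ (inv : List (Int × String)) (res : List (String × Int)) (r0 : String × Int),
    PySem.List.pyGet? res (n - 1) = some r0 →
    heapLoop2 n inv res
      = res ++ ((popAll inv).takeWhile (fun e => -e.1 == r0.2)).map (fun e => (e.2, -e.1)) := by
  intro inv
  generalize hN : inv.length = N
  induction N using Nat.strong_induction_on generalizing inv with
  | _ N ih =>
    intro res r0 hget
    cases inv with
    | nil => rw [heapLoop2, popAll_nil]; simp
    | cons x txs =>
      rw [heapLoop2]
      rw [if_pos ⟨by simp, hn⟩]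
      split
      next heq =>
        obtain ⟨e, inv', h⟩ := popMin_cons_isSome x txs
        rw [h] at heq; cases heq
      next e inv' heq =>
        have hlen := popMin_length heq
        simp only [hget]
        rw [popAll_some heq]
        by_cases hv : (-e.1 : Int) = r0.2
        · rw [if_neg (by simpa using hv)]
          have hidx : (n - 1).toNat < res.length := by
            have := PySem.List.pyGet?_of_nonneg res (i := n - 1) (by omega)
            rw [this] at hget
            exact (List.getElem?_eq_some_iff.mp hget).1
          have hget' : PySem.List.pyGet? (res ++ [(e.2, -e.1)]) (n - 1) = some r0 := by
            rw [PySem.List.pyGet?_of_nonneg _ (by omega)] at hget ⊢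
            rw [List.getElem?_append_left hidx]
            exact hget
          have hN' : inv'.length < N := by
            simp only [List.length_cons] at hN hlen; omega
          rw [ih inv'.length hN' inv' rfl (res ++ [(e.2, -e.1)]) r0 hget']
          rw [List.takeWhile_cons, if_pos (by simpa using hv)]
          simp [List.append_assoc]
        · rw [if_pos (by simpa using hv)]
          rw [List.takeWhile_cons, if_neg (by simpa using hv)]
          simp

theorem main_eq (d : List (String × Int)) (n : Int) :
    keys_with_max_vals d n = keys_with_max_vals_alt d n := by
  have hx : ((PySem.Dict.ofList d).items).Nodup :=
    (PySem.Dict.nodup_keys_ofList d).of_map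
  simp only [keys_with_max_vals, keys_with_max_vals_alt]
  rw [sorted2_eq_sorted_lex, items_sorted_eq _ hx]
  set xs := (PySem.Dict.ofList d).items with hxs
  set S := popAll (xs.map (fun p => ((-p.2 : Int), p.1))) with hS
  have hSlen : S.length = xs.length := by
    rw [hS, (popAll_perm _).length_eq, List.length_map]
  rw [List.length_map, List.length_map, hSlen]
  set n2 : Int := min n (xs.length : Int) with hn2def
  by_cases hn2 : n2 ≤ 0
  · rw [if_pos hn2]
    have : n2.toNat = 0 := by omega
    rw [this]
    simp only [heapLoop1]
    rw [heapLoop2]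
    rw [if_neg (by omega)]
  · rw [if_neg hn2]
    set k : Nat := n2.toNat with hkdef
    have hkL : k ≤ xs.length := by omega
    have hk1 : 0 < k := by omega
    have hkS : k ≤ S.length := by omega
    obtain ⟨h1, h2, _⟩ := heapLoop1_spec k (xs.map (fun p => ((-p.2 : Int), p.1))) []
      (by rw [List.length_map]; exact hkL)
    rw [← hS] at h1 h2
    have hk1S : k - 1 < S.length := by omega
    have hidxNat : (n2 - 1).toNat = k - 1 := by omega
    have hr0 : PySem.List.pyGet? ((heapLoop1 k (xs.map (fun p => ((-p.2 : Int), p.1))) []).1)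
        (n2 - 1) = some ((fun e : Int × String => (e.2, -e.1)) S[k-1]) := by
      rw [h1, List.nil_append, PySem.List.pyGet?_of_nonneg _ (by omega), hidxNat,
        List.getElem?_map, List.getElem?_take, if_pos (by omega),
        List.getElem?_eq_getElem hk1S]
      rfl
    rw [heapLoop2_spec n2 (by omega) _ _ _ hr0, h1, h2, List.nil_append]
    -- B side
    have hthresh : (PySem.List.pyGetD (S.map (fun e : Int × String => (e.2, -e.1))) (n2 - 1)
        ("", 0)).2 = -(S[k-1].1) := by
      rw [PySem.List.pyGetD_of_nonneg _ _ (by omega), hidxNat, List.getD_eq_getElem?_getD,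
        List.getElem?_map, List.getElem?_eq_getElem hk1S]
      rfl
    rw [hthresh]
    rw [PySem.List.slice_to _ (by omega : (0:Int) ≤ n2), ← hkdef, ← List.map_take,
      ← List.map_drop, List.takeWhile_map]
    rfl

-- ===== VERDICT (by name: the statement is the Claim_ definition above) =====
theorem keys_with_max_vals_spec : Claim_equal_keys_with_max_vals := by
  intro d n _
  unfold Spec_keys_with_max_vals
  exact main_eq d n
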